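-- pv_equiv track=rewrite | github.com/MelineTrochon/ddn-darshan | darshan-info2.py | get_host
-- ===== SOURCE A (Python) =====
-- def get_host(dxt_posix):
--     """Return the number of hosts and a dictionnary to convert hostname to a number"""
--     host = {}
--     Y_size = 0
--     for e in dxt_posix:
--         if e['hostname'] not in host:
--             host[e['hostname']] = Y_size
--             Y_size += 1
--     return Y_size, host
-- ===== SOURCE B (Python) =====
-- def get_host(dxt_posix):
--     """Return the number of hosts and a dictionnary to convert hostname to a number"""
--     names = [e['hostname'] for e in dxt_posix]
--     host = {h: len(set(names[:i]))
--             for i, h in enumerate(names) if h not in names[:i]}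
--     return len(host), host
-- ===== Notes on version B (the rewrite author's own statement) =====
-- stated objective: alternative
-- what changed: Drops the running dict/counter state entirely: each first-occurrence hostname gets its ID computed independently as the number of distinct names in the strict prefix before it (prefix-scan membership and len(set(prefix)) instead of incremental dict membership with a mutable counter).
import Mathlib
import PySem

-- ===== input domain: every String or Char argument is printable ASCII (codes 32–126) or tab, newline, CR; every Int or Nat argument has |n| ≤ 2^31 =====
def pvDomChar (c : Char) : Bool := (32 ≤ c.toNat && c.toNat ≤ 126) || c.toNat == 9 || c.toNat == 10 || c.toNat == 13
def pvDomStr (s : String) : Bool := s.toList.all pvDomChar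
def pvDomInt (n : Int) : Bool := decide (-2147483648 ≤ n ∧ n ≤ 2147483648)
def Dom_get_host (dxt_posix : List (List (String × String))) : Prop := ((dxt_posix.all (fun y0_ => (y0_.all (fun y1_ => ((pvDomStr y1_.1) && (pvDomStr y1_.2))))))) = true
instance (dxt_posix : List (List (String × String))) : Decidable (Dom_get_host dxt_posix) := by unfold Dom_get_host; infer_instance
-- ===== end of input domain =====

-- B drops A's running dict/counter state: each first-occurrence hostname gets its ID computed
-- independently as the number of distinct names in the strict prefix before it (alternative, not faster).

-- ===== PORT A =====
def get_host (dxt_posix : List (List (String × String))) : Int × (List (String × Int)) :=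
  let r := dxt_posix.foldl
    (fun (st : PySem.Dict String Int × Int) e =>
      -- e['hostname']: the key is present on every input admitted by Pre_get_host,
      -- so getD is exact there (on other inputs Python raises KeyError)
      let h := (PySem.Dict.mk e).getD "hostname" ""
      if ¬ st.1.contains h then (st.1.insert h st.2, st.2 + 1) else st)
    (PySem.Dict.empty, 0)
  (r.2, r.1.items)

-- ===== PORT B =====
def get_host_alt (dxt_posix : List (List (String × String))) : Int × (List (String × Int)) :=
  -- names = [e['hostname'] for e in dxt_posix]   (same KeyError domain as A, see Pre_get_host)
  let names := dxt_posix.map (fun e => (PySem.Dict.mk e).getD "hostname" "")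
  -- host = {h: len(set(names[:i])) for i, h in enumerate(names) if h not in names[:i]}
  let host := (PySem.List.enumerate names 0).foldl
    (fun (d : PySem.Dict String Int) p =>
      let pref := PySem.List.slice names none (some p.1)
      if ¬ pref.contains p.2 then d.insert p.2 ((PySem.Set.ofList pref).length : Int) else d)
    PySem.Dict.empty
  ((host.size : Int), host.items)

-- ===== PRECONDITION & SPEC =====
-- Pre_ excludes exactly the inputs on which A raises KeyError: some entry lacks the key 'hostname'.
def Pre_get_host (dxt_posix : List (List (String × String))) : Prop :=
  (dxt_posix.all (fun e => e.any (fun p => p.1 == "hostname"))) = true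
instance (dxt_posix : List (List (String × String))) : Decidable (Pre_get_host dxt_posix) := by
  unfold Pre_get_host; infer_instance

def pvWitness_get_host : (List (List (String × String))) :=
  [[("hostname", "n1")], [("hostname", "n2"), ("rank", "0")], [("hostname", "n1")]]

def Spec_get_host (dxt_posix : List (List (String × String))) (out : Int × (List (String × Int))) : Prop := out = get_host_alt dxt_posix
instance (dxt_posix : List (List (String × String))) (out : Int × (List (String × Int))) : Decidable (Spec_get_host dxt_posix out) := by unfold Spec_get_host; infer_instance

-- ===== CLAIM (what is proved, stated in full; the proofs are below) =====
def Claim_equal_get_host : Prop := ∀ (dxt_posix : List (List (String × String))), Dom_get_host dxt_posix → Pre_get_host dxt_posix → Spec_get_host dxt_posix (get_host dxt_posix)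

-- ===== LEMMAS AND PROOFS =====

-- the hostname extraction both ports perform per entry
def nameOf (e : List (String × String)) : String := (PySem.Dict.mk e).getD "hostname" ""

-- first-seen-order dict over an (already deduplicated) name list, the common value of both ports
def hostDict (u : List String) : PySem.Dict String Int :=
  (PySem.List.enumerate u 0).foldl
    (fun (d : PySem.Dict String Int) p => d.insert p.2 p.1) PySem.Dict.empty

-- A's loop body, with the hostname extraction peeled off
def stepA (st : PySem.Dict String Int × Int) (h : String) : PySem.Dict String Int × Int :=
  if ¬ st.1.contains h then (st.1.insert h st.2, st.2 + 1) else st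

-- B's fold body over enumerate, with the hostname extraction peeled off
def stepB (names : List String) (d : PySem.Dict String Int) (p : Int × String) : PySem.Dict String Int :=
  let pref := PySem.List.slice names none (some p.1)
  if ¬ pref.contains p.2 then d.insert p.2 ((PySem.Set.ofList pref).length : Int) else d

def bDict (names : List String) : PySem.Dict String Int :=
  (PySem.List.enumerate names 0).foldl (stepB names) PySem.Dict.empty

theorem keys_hostDict (u : List String) : (hostDict u).keys = PySem.Set.ofList u := by
  unfold hostDict
  rw [PySem.Dict.keys_foldl_insert_key]
  simp [PySem.List.map_snd_enumerate, PySem.Set.update, PySem.Set.ofList_eq_foldl]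

theorem contains_hostDict (u : List String) (h : String) :
    (hostDict u).contains h = u.contains h := by
  have h1 : (hostDict u).contains h = (hostDict u).keys.any (· == h) := by
    simp [PySem.Dict.contains, PySem.Dict.keys, List.any_map]; rfl
  rw [h1, keys_hostDict]
  rw [Bool.eq_iff_iff]
  simp only [List.any_eq_true, beq_iff_eq, PySem.Set.mem_ofList, List.contains_iff_mem]
  constructor
  · rintro ⟨x, hx, rfl⟩; exact hx
  · intro hm; exact ⟨h, hm, rfl⟩

theorem hostDict_snoc (u : List String) (h : String) :
    hostDict (u ++ [h]) = (hostDict u).insert h (u.length : Int) := by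
  unfold hostDict
  rw [PySem.List.enumerate_append, List.foldl_append]
  simp [PySem.List.enumerate]

-- invariant of A's loop
theorem loopA_invariant (names : List String) : ∀ u : List String,
    names.foldl stepA (hostDict u, (u.length : Int)) =
      (hostDict (PySem.Set.update u names), ((PySem.Set.update u names).length : Int)) := by
  induction names with
  | nil => intro u; simp [PySem.Set.update]
  | cons h names ih =>
    intro u
    have hstep : stepA (hostDict u, (u.length : Int)) h =
        (hostDict (PySem.Set.add u h), ((PySem.Set.add u h).length : Int)) := by
      by_cases hm : h ∈ u
      · simp [stepA, contains_hostDict, PySem.Set.add, PySem.Set.contains, hm]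
      · simp [stepA, contains_hostDict, PySem.Set.add, PySem.Set.contains, hostDict_snoc, hm]
    rw [List.foldl_cons, hstep]
    have := ih (PySem.Set.add u h)
    rw [this]
    simp [PySem.Set.update]

theorem update_disjoint : ∀ (u s : List String), (s ++ u).Nodup → PySem.Set.update s u = s ++ u := by
  intro u
  induction u with
  | nil => intro s _; simp [PySem.Set.update]
  | cons x u ih =>
    intro s hnd
    have hx : x ∉ s := by
      intro hm
      exact (List.disjoint_of_nodup_append hnd) hm (by simp)
    have hadd : PySem.Set.add s x = s ++ [x] := by
      simp [PySem.Set.add, PySem.Set.contains, hx]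
    have : PySem.Set.update s (x :: u) = PySem.Set.update (s ++ [x]) u := by
      simp [PySem.Set.update, hadd]
    rw [this, ih (s ++ [x]) (by simp only [List.append_assoc, List.singleton_append]; exact hnd)]
    simp

theorem ofList_nodup_eq (u : List String) (hu : u.Nodup) : PySem.Set.ofList u = u := by
  rw [PySem.Set.ofList_eq_foldl]
  have := update_disjoint u [] (by simpa using hu)
  simpa [PySem.Set.update] using this

theorem size_hostDict (u : List String) (hu : u.Nodup) : (hostDict u).size = u.length := by
  have hk : (hostDict u).keys.length = u.length := by
    rw [keys_hostDict, ofList_nodup_eq u hu]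
  simpa [PySem.Dict.keys, PySem.Dict.size] using hk

theorem ofList_snoc (xs : List String) (x : String) :
    PySem.Set.ofList (xs ++ [x]) = PySem.Set.add (PySem.Set.ofList xs) x := by
  simp [PySem.Set.ofList_eq_foldl, List.foldl_append]

-- B's fold builds exactly the first-seen-order dict
theorem bDict_eq_hostDict : ∀ names : List String,
    bDict names = hostDict (PySem.Set.ofList names) := by
  intro names
  induction names using List.reverseRecOn with
  | nil => rfl
  | append_singleton full h ih =>
    unfold bDict
    rw [PySem.List.enumerate_append, List.foldl_append]
    have hcong : (PySem.List.enumerate full 0).foldl (stepB (full ++ [h])) PySem.Dict.empty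
        = (PySem.List.enumerate full 0).foldl (stepB full) PySem.Dict.empty := by
      apply PySem.List.foldl_congr_mem
      intro acc p hp
      rcases (PySem.List.mem_enumerate_iff _ _ _).1 hp with ⟨k, hk, rfl⟩
      simp only [stepB, zero_add, PySem.List.slice_to_natCast,
        List.take_append_of_le_length (Nat.le_of_lt hk)]
    rw [hcong]
    have hlast : PySem.List.enumerate [h] ((0 : Int) + full.length) = [((full.length : Int), h)] := by
      simp [PySem.List.enumerate]
    rw [hlast]
    have hpref : PySem.List.slice (full ++ [h]) none (some ((full.length : Int))) = full := by
      rw [PySem.List.slice_to_natCast]; simp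
    simp only [List.foldl_cons, List.foldl_nil]
    show stepB (full ++ [h]) (bDict full) ((full.length : Int), h) = _
    rw [ofList_snoc]
    by_cases hm : h ∈ full
    · have : PySem.Set.add (PySem.Set.ofList full) h = PySem.Set.ofList full := by
        simp [PySem.Set.add, PySem.Set.contains, PySem.Set.mem_ofList, hm]
      rw [this]
      simp [stepB, hpref, hm, ih]
    · have : PySem.Set.add (PySem.Set.ofList full) h = PySem.Set.ofList full ++ [h] := by
        simp [PySem.Set.add, PySem.Set.contains, PySem.Set.mem_ofList, hm]
      rw [this, hostDict_snoc]
      simp [stepB, hpref, hm, ih]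

-- characterisation of A's whole body
theorem getA (dxt : List (List (String × String))) :
    get_host dxt =
    (((PySem.Set.ofList (dxt.map nameOf)).length : Int),
      (hostDict (PySem.Set.ofList (dxt.map nameOf))).items) := by
  unfold get_host
  have h1 : dxt.foldl
      (fun (st : PySem.Dict String Int × Int) e =>
        let h := (PySem.Dict.mk e).getD "hostname" ""
        if ¬ st.1.contains h then (st.1.insert h st.2, st.2 + 1) else st)
      (PySem.Dict.empty, 0)
      = (dxt.map nameOf).foldl stepA (hostDict [], ((List.length ([] : List String) : Int))) := by
    rw [List.foldl_map]
    rfl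
  rw [h1, loopA_invariant]
  simp [PySem.Set.ofList_eq_foldl, PySem.Set.update]

theorem get_host_eq_alt (dxt : List (List (String × String))) : get_host dxt = get_host_alt dxt := by
  rw [getA]
  unfold get_host_alt
  have hb : bDict (dxt.map nameOf) = hostDict (PySem.Set.ofList (dxt.map nameOf)) :=
    bDict_eq_hostDict _
  have hnd := PySem.Set.nodup_ofList (dxt.map nameOf)
  show _ = (((bDict (dxt.map nameOf)).size : Int), (bDict (dxt.map nameOf)).items)
  rw [hb, size_hostDict _ hnd]

-- ===== VERDICT (by name: the statement is the Claim_ definition above) =====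
theorem get_host_spec : Claim_equal_get_host := by
  intro dxt _ _
  exact get_host_eq_alt dxt
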